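-- pv_equiv track=rewrite | github.com/martinphellwig/shs | shs/fips_pub_180_3/_binary.py | _all_bits
-- ===== SOURCE A (Python) =====
-- def _all_bits(string):
--     replace = ['0', '1']
--     for character in replace:
--         string = string.replace(character, '')
--     if len(string) == 0:
--         return(True)
--     else:
--         return(False)
-- ===== SOURCE B (Python) =====
-- def _all_bits(string):
--     return set(string) <= {'0', '1'}
-- ===== Notes on version B (the rewrite author's own statement) =====
-- stated objective: idiomatic
-- what changed: B replaces A's loop that strips '0'/'1' via repeated str.replace and measures the leftover length with a single set-subset test set(string) <= {'0','1'}.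
import Mathlib
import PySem

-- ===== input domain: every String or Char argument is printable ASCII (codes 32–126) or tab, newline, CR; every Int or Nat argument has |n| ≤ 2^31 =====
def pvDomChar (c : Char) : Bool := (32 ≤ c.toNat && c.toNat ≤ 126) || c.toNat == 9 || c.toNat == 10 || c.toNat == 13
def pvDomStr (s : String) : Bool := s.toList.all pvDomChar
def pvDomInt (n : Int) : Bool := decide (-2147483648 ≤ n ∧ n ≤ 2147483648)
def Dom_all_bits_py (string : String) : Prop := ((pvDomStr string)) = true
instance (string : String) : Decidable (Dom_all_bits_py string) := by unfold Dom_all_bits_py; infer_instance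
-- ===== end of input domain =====

-- B is the idiomatic set-subset test; A strips '0'/'1' via replace and checks the leftover length.

-- ===== PORT A =====
def all_bits_py (string : String) : Bool :=
  -- for character in ['0', '1']: string = string.replace(character, '')
  let s := ["0", "1"].foldl (fun st character => PySem.Str.replace st character "") string
  -- if len(string) == 0: return True else: return False
  if PySem.Str.len s == 0 then true else false

-- ===== PORT B =====
def all_bits_py_alt (string : String) : Bool :=
  -- return set(string) <= {'0', '1'}
  PySem.Set.issubset (PySem.Set.ofList string.toList) (PySem.Set.ofList ['0', '1'])

-- ===== PRECONDITION & SPEC =====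
def Spec_all_bits_py (string : String) (out : Bool) : Prop := out = all_bits_py_alt string
instance (string : String) (out : Bool) : Decidable (Spec_all_bits_py string out) := by unfold Spec_all_bits_py; infer_instance

-- ===== CLAIM (what is proved, stated in full; the proofs are below) =====
def Claim_equal_all_bits_py : Prop := ∀ (string : String), Dom_all_bits_py string → Spec_all_bits_py string (all_bits_py string)

-- ===== LEMMAS AND PROOFS =====

-- replace.go with a single-char pattern and empty replacement is filter (· ≠ a)
lemma replace_go_single (a : Char) :
    ∀ (fuel : Nat) (l acc : List Char), l.length ≤ fuel →
      PySem.Chars.replace.go [a] [] fuel l acc = acc.reverse ++ l.filter (· ≠ a) := by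
  intro fuel
  induction fuel with
  | zero =>
    intro l acc h
    have : l = [] := List.eq_nil_of_length_eq_zero (Nat.le_zero.mp h)
    subst this
    simp [PySem.Chars.replace.go]
  | succ n ih =>
    intro l acc h
    cases l with
    | nil => simp [PySem.Chars.replace.go]
    | cons c t =>
      simp only [PySem.Chars.replace.go]
      by_cases hc : c = a
      · subst hc
        have hpre : List.isPrefixOf [c] (c :: t) = true := by
          simp [List.isPrefixOf]
        simp only [hpre, if_pos, List.length_cons, List.length_nil, List.drop,
          List.reverse_nil, List.nil_append]
        rw [ih t acc (by simpa using Nat.succ_le_succ_iff.mp h)]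
        simp
      · have hpre : List.isPrefixOf [a] (c :: t) = false := by
          simp [List.isPrefixOf]
          exact fun hh => (hc hh.symm).elim
        simp only [hpre]
        rw [ih t (c :: acc) (by simpa using Nat.succ_le_succ_iff.mp h)]
        simp [hc]

lemma replace_single (a : Char) (l : List Char) :
    PySem.Chars.replace l [a] [] = l.filter (· ≠ a) := by
  have : PySem.Chars.replace l [a] [] = PySem.Chars.replace.go [a] [] l.length l [] := by
    simp [PySem.Chars.replace]
  rw [this]
  exact replace_go_single a l.length l [] le_rfl

lemma filter_empty_iff (l : List Char) :
    (l.filter (fun c => c ≠ '0')).filter (fun c => c ≠ '1') = [] ↔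
      ∀ c ∈ l, c = '0' ∨ c = '1' := by
  rw [List.filter_filter, List.filter_eq_nil_iff]
  constructor
  · intro h c hc
    have hcc := h c hc
    by_contra hn
    rw [not_or] at hn
    simp [hn.1, hn.2] at hcc
  · intro h c hc
    rcases h c hc with h0 | h0 <;> simp [h0]

lemma alt_iff (l : List Char) :
    PySem.Set.issubset (PySem.Set.ofList l) (PySem.Set.ofList ['0', '1']) = true ↔
      ∀ c ∈ l, c = '0' ∨ c = '1' := by
  simp only [PySem.Set.issubset, List.all_eq_true]
  constructor
  · intro hall c hc
    have h1 := hall c ((PySem.Set.mem_ofList l c).mpr hc)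
    have h2 : c ∈ PySem.Set.ofList ['0', '1'] := by
      simpa [PySem.Set.contains] using h1
    have h3 : c ∈ (['0', '1'] : List Char) := (PySem.Set.mem_ofList _ c).mp h2
    simpa using h3
  · intro h x hx
    have hxl : x ∈ l := (PySem.Set.mem_ofList l x).mp hx
    show PySem.Set.contains _ x = true
    have h2 : x ∈ PySem.Set.ofList (['0', '1'] : List Char) := by
      apply (PySem.Set.mem_ofList _ x).mpr
      rcases h x hxl with h0 | h0 <;> simp [h0]
    simpa [PySem.Set.contains] using h2

-- ===== VERDICT (by name: the statement is the Claim_ definition above) =====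
theorem all_bits_py_spec : Claim_equal_all_bits_py := by
  intro string _
  unfold Spec_all_bits_py all_bits_py all_bits_py_alt
  simp only [List.foldl, PySem.Str.len_eq, PySem.Str.toList_replace]
  have h01 : ("0" : String).toList = ['0'] := rfl
  have h11 : ("1" : String).toList = ['1'] := rfl
  have he : ("" : String).toList = [] := rfl
  rw [h01, h11, he, replace_single, replace_single]
  set l := string.toList with hl
  by_cases h : ∀ c ∈ l, c = '0' ∨ c = '1'
  · rw [(filter_empty_iff l).mpr h, (alt_iff l).mpr h]
    simp
  · have hne := (not_iff_not.mpr (filter_empty_iff l)).mpr h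
    have halt : PySem.Set.issubset (PySem.Set.ofList l) (PySem.Set.ofList ['0', '1']) = false := by
      rw [← Bool.not_eq_true, alt_iff l]; exact h
    rw [halt]
    have hlen : ((l.filter (fun c => c ≠ '0')).filter (fun c => c ≠ '1')).length ≠ 0 := by
      simpa [List.length_eq_zero_iff] using hne
    rw [if_neg]
    simp only [beq_iff_eq]
    exact_mod_cast hlen
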